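-- pv_equiv track=rewrite | github.com/dev-parkjs/coding_test2 | 프로그래머스/0/181864. 문자열 바꿔서 찾기/문자열 바꿔서 찾기.py | solution
-- ===== SOURCE A (Python) =====
-- def solution(myString, pat):
--     answer = ""
--     for i in myString:
--         if i == "A":
--             answer += "B"
--         elif i == "B":
--             answer += "A"
--
--     return 1 if pat in answer else 0
-- ===== SOURCE B (Python) =====
-- def solution(myString, pat):
--     # A<->B swap is an involution, so pat in swap(filter(s)) iff swap(pat) in filter(s):
--     # filter myString without swapping, swap pat instead.
--     filtered = ''.join(c for c in myString if c in 'AB')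
--     swapped_pat = ''.join('B' if c == 'A' else 'A' if c == 'B' else c for c in pat)
--     return 1 if swapped_pat in filtered else 0
-- ===== Notes on version B (the rewrite author's own statement) =====
-- stated objective: alternative
-- what changed: Since A<->B swapping is an involution, B filters myString to its A/B characters without swapping and instead swaps the pattern, testing swap(pat) in filter(myString) rather than pat in swap(filter(myString)).
import Mathlib
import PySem

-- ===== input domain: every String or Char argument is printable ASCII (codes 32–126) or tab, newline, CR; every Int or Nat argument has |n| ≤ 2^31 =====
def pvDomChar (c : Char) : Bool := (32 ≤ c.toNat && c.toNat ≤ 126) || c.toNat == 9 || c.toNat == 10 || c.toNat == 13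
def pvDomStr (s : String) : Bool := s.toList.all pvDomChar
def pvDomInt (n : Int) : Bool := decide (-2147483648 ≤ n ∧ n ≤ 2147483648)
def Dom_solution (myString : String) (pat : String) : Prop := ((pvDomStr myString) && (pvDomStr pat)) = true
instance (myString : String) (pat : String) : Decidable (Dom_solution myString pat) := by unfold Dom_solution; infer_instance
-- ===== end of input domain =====

-- B swaps the pattern instead of the string: same membership test by involution; no speed claim.

-- ===== PORT A =====
def solution (myString : String) (pat : String) : Int :=
  let answer : List Char := myString.toList.foldl
    (fun acc i => if i = 'A' then acc ++ ['B'] else if i = 'B' then acc ++ ['A'] else acc) []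
  if PySem.Chars.isIn pat.toList answer then 1 else 0

-- ===== PORT B =====
def pvSwapAB (c : Char) : Char := if c = 'A' then 'B' else if c = 'B' then 'A' else c

def solution_alt (myString : String) (pat : String) : Int :=
  let filtered : List Char := myString.toList.filter (fun c => c = 'A' || c = 'B')
  let swappedPat : List Char := pat.toList.map pvSwapAB
  if PySem.Chars.isIn swappedPat filtered then 1 else 0

-- ===== PRECONDITION & SPEC =====
def Spec_solution (myString : String) (pat : String) (out : Int) : Prop := out = solution_alt myString pat
instance (myString : String) (pat : String) (out : Int) : Decidable (Spec_solution myString pat out) := by unfold Spec_solution; infer_instance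

-- ===== CLAIM (what is proved, stated in full; the proofs are below) =====
def Claim_equal_solution : Prop := ∀ (myString : String) (pat : String), Dom_solution myString pat → Spec_solution myString pat (solution myString pat)

-- ===== LEMMAS AND PROOFS =====
theorem pvSwapAB_invol (c : Char) : pvSwapAB (pvSwapAB c) = c := by
  unfold pvSwapAB; split_ifs with h1 h2 h3 h4 <;> simp_all

theorem pv_map_swap_swap (l : List Char) : (l.map pvSwapAB).map pvSwapAB = l := by
  rw [List.map_map]
  have : pvSwapAB ∘ pvSwapAB = id := funext pvSwapAB_invol
  simp [this]

-- A's accumulator loop = swap-map of the A/B filter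
theorem pv_answer_eq (l : List Char) (acc : List Char) :
    l.foldl (fun acc i => if i = 'A' then acc ++ ['B'] else if i = 'B' then acc ++ ['A'] else acc) acc
      = acc ++ (l.filter (fun c => c = 'A' || c = 'B')).map pvSwapAB := by
  induction l generalizing acc with
  | nil => simp
  | cons c t ih =>
    simp only [List.foldl_cons, List.filter_cons]
    by_cases h1 : c = 'A'
    · simp [h1, ih, pvSwapAB]
    · by_cases h2 : c = 'B'
      · simp [h2, ih, pvSwapAB]
      · simp [h1, h2, ih]

theorem pv_infix_swap (p l : List Char) :
    p <:+: l.map pvSwapAB ↔ p.map pvSwapAB <:+: l := by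
  constructor
  · intro h
    have := h.map pvSwapAB
    rwa [pv_map_swap_swap] at this
  · intro h
    have := h.map pvSwapAB
    rwa [pv_map_swap_swap] at this

-- ===== VERDICT (by name: the statement is the Claim_ definition above) =====
theorem solution_spec : Claim_equal_solution := by
  intro myString pat _
  unfold Spec_solution solution solution_alt
  simp only [pv_answer_eq, List.nil_append]
  have : PySem.Chars.isIn pat.toList ((myString.toList.filter (fun c => c = 'A' || c = 'B')).map pvSwapAB)
      = PySem.Chars.isIn (pat.toList.map pvSwapAB) (myString.toList.filter (fun c => c = 'A' || c = 'B')) := by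
    rw [Bool.eq_iff_iff, PySem.Chars.isIn_iff_infix, PySem.Chars.isIn_iff_infix]
    exact pv_infix_swap _ _
  rw [this]
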